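-- pv_equiv track=rewrite | github.com/FacuGarces/IP-Ex-Algo1- | Python/Parcial B.py | subsecuencia_mas_larga
-- ===== SOURCE A (Python) =====
-- def subsecuencia_mas_larga(tipos_pacientes_atendidos: list[str]) -> int:
--     cant: int = 0
--     max_cant: int = 0
--     res: int = 0
--
--     for i in range(len(tipos_pacientes_atendidos)):
--         if tipos_pacientes_atendidos[i] == "perro" or tipos_pacientes_atendidos[i] == "gato":
--             cant += 1
--         else:
--             if cant > max_cant:
--                 max_cant = cant
--                 res = i - cant
--             cant = 0
--
--     if cant > max_cant:
--         max_cant = cant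
--         res = len(tipos_pacientes_atendidos) - cant  # Ajuste del índice
--
--     return res
-- ===== SOURCE B (Python) =====
-- def subsecuencia_mas_larga(tipos_pacientes_atendidos: list[str]) -> int:
--     # Build the list of maximal runs (is_match, length) first, then pick the
--     # first longest matching run in a second pass over the runs.
--     runs = []
--     for x in tipos_pacientes_atendidos:
--         m = x in ("perro", "gato")
--         if runs and runs[-1][0] == m:
--             runs[-1][1] += 1
--         else:
--             runs.append([m, 1])
--     i = 0
--     best = 0
--     res = 0
--     for m, n in runs:
--         if m and n > best:
--             best = n
--             res = i
--         i += n
--     return res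
-- ===== Notes on version B (the rewrite author's own statement) =====
-- stated objective: alternative
-- what changed: B first compresses the list into maximal runs (is_match, length) and then scans the runs for the first strictly-longest matching run, instead of A's single index loop with a running counter and end-of-loop fixup.
import Mathlib
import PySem

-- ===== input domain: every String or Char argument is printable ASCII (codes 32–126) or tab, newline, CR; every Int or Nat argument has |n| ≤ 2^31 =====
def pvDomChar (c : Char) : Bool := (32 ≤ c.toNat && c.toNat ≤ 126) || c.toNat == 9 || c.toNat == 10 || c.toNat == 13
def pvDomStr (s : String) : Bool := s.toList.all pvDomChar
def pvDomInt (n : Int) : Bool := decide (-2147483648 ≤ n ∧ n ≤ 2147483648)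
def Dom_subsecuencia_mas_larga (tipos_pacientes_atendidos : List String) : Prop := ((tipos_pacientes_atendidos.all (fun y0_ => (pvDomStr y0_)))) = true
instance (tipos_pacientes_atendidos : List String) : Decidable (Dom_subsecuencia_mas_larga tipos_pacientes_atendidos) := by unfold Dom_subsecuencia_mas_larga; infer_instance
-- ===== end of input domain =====

-- B builds the maximal runs first and then scans them for the first longest matching run (alternative decomposition, same cost).


-- ===== PORT A =====
-- the for-i loop of A: recursion over the list carrying the index i and the state (cant, max_cant, res)
def pvALoop (xs : List String) (i cant max_cant res : Int) : Int × Int × Int :=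
  match xs with
  | [] => (cant, max_cant, res)
  | x :: rest =>
    if x == "perro" || x == "gato" then
      pvALoop rest (i + 1) (cant + 1) max_cant res
    else
      if cant > max_cant then pvALoop rest (i + 1) 0 cant (i - cant)
      else pvALoop rest (i + 1) 0 max_cant res

def subsecuencia_mas_larga (tipos_pacientes_atendidos : List String) : Int :=
  let st := pvALoop tipos_pacientes_atendidos 0 0 0 0
  if st.1 > st.2.1 then (tipos_pacientes_atendidos.length : Int) - st.1 else st.2.2

-- ===== PORT B =====
def pvIsPG (x : String) : Bool := x == "perro" || x == "gato"

-- Source B's first loop: runs built left to right; the accumulator keeps the runs reversed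
-- (head = last run, mirroring Source B's append / increment-of-last), reversed at the end.
def pvRuns (xs : List String) : List (Bool × Int) :=
  (xs.foldl (fun acc x =>
      match acc with
      | (b, k) :: rest => if b == pvIsPG x then (b, k + 1) :: rest else (pvIsPG x, 1) :: (b, k) :: rest
      | [] => [(pvIsPG x, 1)]) []).reverse

-- Source B's second loop
def pvBLoop (rs : List (Bool × Int)) (i best res : Int) : Int :=
  match rs with
  | [] => res
  | (m, n) :: rest =>
    if m = true ∧ n > best then pvBLoop rest (i + n) n i
    else pvBLoop rest (i + n) best res

def subsecuencia_mas_larga_alt (tipos_pacientes_atendidos : List String) : Int :=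
  pvBLoop (pvRuns tipos_pacientes_atendidos) 0 0 0

-- ===== PRECONDITION & SPEC =====
def Spec_subsecuencia_mas_larga (tipos_pacientes_atendidos : List String) (out : Int) : Prop := out = subsecuencia_mas_larga_alt tipos_pacientes_atendidos
instance (tipos_pacientes_atendidos : List String) (out : Int) : Decidable (Spec_subsecuencia_mas_larga tipos_pacientes_atendidos out) := by unfold Spec_subsecuencia_mas_larga; infer_instance

-- ===== CLAIM (what is proved, stated in full; the proofs are below) =====
def Claim_equal_subsecuencia_mas_larga : Prop := ∀ (tipos_pacientes_atendidos : List String), Dom_subsecuencia_mas_larga tipos_pacientes_atendidos → Spec_subsecuencia_mas_larga tipos_pacientes_atendidos (subsecuencia_mas_larga tipos_pacientes_atendidos)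

-- ===== LEMMAS AND PROOFS =====

-- cons a run (b, k) onto a run list, merging with the head run when its key matches
def consRunB (b : Bool) (k : Int) (rs : List (Bool × Int)) : List (Bool × Int) :=
  match rs with
  | (b', n) :: rest => if b' == b then (b, k + n) :: rest else (b, k) :: rs
  | [] => [(b, k)]

-- structural (right-recursion) version of pvRuns, convenient for induction
def gRuns : List String → List (Bool × Int)
  | [] => []
  | x :: xs => consRunB (pvIsPG x) 1 (gRuns xs)

-- a pending match-run of length c (c = 0 → nothing pending)
def consRun (c : Int) (rs : List (Bool × Int)) : List (Bool × Int) :=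
  if c = 0 then rs else consRunB true c rs

theorem consRunB_merge (b : Bool) (k : Int) (rs : List (Bool × Int)) :
    consRunB b k (consRunB b 1 rs) = consRunB b (k + 1) rs := by
  match rs with
  | [] => simp [consRunB]
  | (b', n) :: rest =>
    by_cases h : b' = b <;> simp [consRunB, h] <;> ring_nf

theorem consRunB_false_head (c : Int) (rs : List (Bool × Int)) :
    consRunB true c (consRunB false 1 rs) = (true, c) :: consRunB false 1 rs := by
  cases rs with
  | nil => simp [consRunB]
  | cons p r =>
    obtain ⟨b, n⟩ := p
    cases b <;> simp [consRunB]

theorem runs_foldl_acc (xs : List String) (b : Bool) (k : Int) (rest : List (Bool × Int)) :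
    (xs.foldl (fun acc x =>
      match acc with
      | (b, k) :: rest => if b == pvIsPG x then (b, k + 1) :: rest else (pvIsPG x, 1) :: (b, k) :: rest
      | [] => [(pvIsPG x, 1)]) ((b, k) :: rest)).reverse
    = rest.reverse ++ consRunB b k (gRuns xs) := by
  induction xs generalizing b k rest with
  | nil => simp [gRuns, consRunB]
  | cons x xs ih =>
    by_cases h : b = pvIsPG x
    · subst h
      simp only [List.foldl_cons, beq_self_eq_true, if_true]
      rw [ih]
      simp [gRuns, consRunB_merge]
    · have hb : (b == pvIsPG x) = false := by simp [h]
      simp only [List.foldl_cons, hb, Bool.false_eq_true, if_false]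
      have hhd : consRunB b k (gRuns (x :: xs)) = (b, k) :: gRuns (x :: xs) := by
        simp only [gRuns]
        cases hg : gRuns xs with
        | nil => simp [consRunB, Ne.symm h]
        | cons p r =>
          obtain ⟨b', n⟩ := p
          by_cases h' : b' = pvIsPG x <;>
              simp [consRunB, h', Ne.symm h]
      rw [ih, show consRunB (pvIsPG x) 1 (gRuns xs) = gRuns (x :: xs) from rfl, hhd]
      simp

theorem pvRuns_eq_gRuns (xs : List String) : pvRuns xs = gRuns xs := by
  unfold pvRuns
  cases xs with
  | nil => simp [gRuns]
  | cons x xs =>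
    simp only [List.foldl_cons]
    have := runs_foldl_acc xs (pvIsPG x) 1 []
    simpa [gRuns] using this

-- stepping pvBLoop over a non-matching run just advances the index
theorem bloop_false_run (rs : List (Bool × Int)) (j best res : Int) :
    pvBLoop (consRunB false 1 rs) j best res = pvBLoop rs (j + 1) best res := by
  cases rs with
  | nil => simp [consRunB, pvBLoop]
  | cons p r =>
    obtain ⟨b, n⟩ := p
    cases b with
    | false =>
      simp only [consRunB, beq_self_eq_true, if_true, pvBLoop,
        Bool.false_eq_true, false_and, if_false]
      rw [show j + (1 + n) = j + 1 + n by ring]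
    | true =>
      simp [consRunB, pvBLoop]

-- main invariant: A's loop with a pending match-run of length cant equals B's run scan
theorem main_inv (xs : List String) (i cant mx res : Int)
    (hc : 0 ≤ cant) (hm : 0 ≤ mx) :
    (let st := pvALoop xs i cant mx res
     if st.1 > st.2.1 then (i + (xs.length : Int)) - st.1 else st.2.2)
    = pvBLoop (consRun cant (gRuns xs)) (i - cant) mx res := by
  induction xs generalizing i cant mx res with
  | nil =>
    simp only [pvALoop, List.length_nil]
    by_cases h0 : cant = 0
    · subst h0
      simp only [consRun, if_true, gRuns, pvBLoop]
      have : ¬ ((0 : Int) > mx) := by omega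
      simp [this]
    · simp only [consRun, h0, if_false, gRuns, consRunB, pvBLoop]
      by_cases h : cant > mx
      · simp [h]
      · simp [h]
  | cons x xs ih =>
    by_cases hx : pvIsPG x = true
    · have hx' : (x == "perro" || x == "gato") = true := hx
      simp only [pvALoop, hx', if_true]
      have key := ih (i + 1) (cant + 1) mx res (by omega) hm
      simp only [List.length_cons] at key ⊢
      push_cast at key ⊢
      rw [show (i : Int) + 1 + (xs.length : Int) = i + ((xs.length : Int) + 1) by ring] at key
      rw [show (i : Int) + 1 - (cant + 1) = i - cant by ring] at key
      rw [key]
      congr 1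
      simp only [gRuns, hx]
      by_cases h0 : cant = 0
      · subst h0
        simp [consRun]
      · have h1 : cant + 1 ≠ 0 := by omega
        simp only [consRun, h0, h1, if_false]
        rw [consRunB_merge]
    · have hx' : (x == "perro" || x == "gato") = false := by
        simpa [pvIsPG] using hx
      have hxb : pvIsPG x = false := by simpa using hx
      simp only [pvALoop, hx', Bool.false_eq_true, if_false]
      have hg : gRuns (x :: xs) = consRunB false 1 (gRuns xs) := by
        simp [gRuns, hxb]
      by_cases h0 : cant = 0
      · subst h0
        have hgt : ¬ ((0 : Int) > mx) := by omega
        simp only [hgt, if_false]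
        have key := ih (i + 1) 0 mx res le_rfl hm
        simp only [List.length_cons] at key ⊢
        push_cast at key ⊢
        rw [show (i : Int) + 1 + (xs.length : Int) = i + ((xs.length : Int) + 1) by ring] at key
        rw [key]
        simp only [consRun, if_true, hg, sub_zero]
        rw [bloop_false_run]
      · simp only [consRun, h0, if_false, hg, consRunB_false_head, pvBLoop]
        by_cases hgt : cant > mx
        · have key := ih (i + 1) 0 cant (i - cant) le_rfl (by omega)
          simp only [List.length_cons] at key ⊢
          push_cast at key ⊢
          rw [show (i : Int) + 1 + (xs.length : Int) = i + ((xs.length : Int) + 1) by ring] at key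
          simp only [hgt, if_true, and_true]
          rw [key]
          simp only [consRun, if_true, sub_zero]
          rw [show i - cant + cant = i by ring, bloop_false_run]
        · have key := ih (i + 1) 0 mx res le_rfl hm
          simp only [List.length_cons] at key ⊢
          push_cast at key ⊢
          rw [show (i : Int) + 1 + (xs.length : Int) = i + ((xs.length : Int) + 1) by ring] at key
          simp only [hgt, if_false, true_and]
          rw [key]
          simp only [consRun, if_true, sub_zero]
          rw [show i - cant + cant = i by ring, bloop_false_run]

-- ===== VERDICT (by name: the statement is the Claim_ definition above) =====
theorem subsecuencia_mas_larga_spec : Claim_equal_subsecuencia_mas_larga := by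
  intro xs _
  unfold Spec_subsecuencia_mas_larga subsecuencia_mas_larga subsecuencia_mas_larga_alt
  rw [pvRuns_eq_gRuns]
  have := main_inv xs 0 0 0 0 le_rfl le_rfl
  simpa [consRun] using this
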